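-- pv_equiv track=rewrite | github.com/aslammaruf/AdventOfCode | 2020/Day11/Day11.py | seatingSystemP2
-- ===== SOURCE A (Python) =====
-- import copy
--
-- def seatingSystemP2( arr ):
--     # Top Left, Top Middle, Top Right , Mid Left, Mid Right, Bot Left, Bot Mid, Bot Right
--     checkArr = [ (-1,-1) , (-1,0) , (-1,1) , (0,-1) , (0,1) , (1,-1) , (1,0) , (1,1) ]
--     history = []
--
--     while history != arr:
--         history = copy.deepcopy(arr)
--
--         for row in range( len(arr) ):
--             for col in range( len(arr[0]) ):
--                 checkList = []
--
--                 for i, check in enumerate(checkArr):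
--                     x, y = check
--                     found = 0
--
--                     while 0 <= row + x < len(arr) and 0 <= col + y < len(arr[0]) and found == 0:
--                         if history[row + x][col + y] == "#":
--                             checkList.append( True )
--                             found = 1
--                         elif history[row + x][col + y] == "L":
--                             checkList.append( False )
--                             found = 1
--                         x += checkArr[i][0]
--                         y += checkArr[i][1]
--
--                 if history[row][col] == "L" and sum(checkList) == 0:
--                     arr[row][col] = "#"
--                 elif history[row][col] == "#" and sum(checkList) >= 5:
--                     arr[row][col] = "L"
--
--     return sum( x.count("#") for x in arr )
-- ===== SOURCE B (Python) =====
-- def seatingSystemP2(arr):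
--     R = len(arr)
--     C = len(arr[0]) if arr else 0
--     dirs = [(-1, -1), (-1, 0), (-1, 1), (0, -1), (0, 1), (1, -1), (1, 0), (1, 1)]
--     # The seat layout never changes, so compute each seat's visible neighbours once.
--     seats = [(r, c) for r in range(R) for c in range(C) if arr[r][c] in ("L", "#")]
--     idx = {p: i for i, p in enumerate(seats)}
--     nbrs = []
--     for (r, c) in seats:
--         vs = []
--         for (dx, dy) in dirs:
--             x, y = r + dx, c + dy
--             while 0 <= x < R and 0 <= y < C:
--                 j = idx.get((x, y))
--                 if j is not None:
--                     vs.append(j)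
--                     break
--                 x += dx
--                 y += dy
--         nbrs.append(vs)
--     # Iterate the automaton on a flat occupancy vector, O(8) work per seat per round.
--     state = [arr[r][c] == "#" for (r, c) in seats]
--     while True:
--         new = []
--         for occ, vs in zip(state, nbrs):
--             n = sum(state[j] for j in vs)
--             if not occ and n == 0:
--                 new.append(True)
--             elif occ and n >= 5:
--                 new.append(False)
--             else:
--                 new.append(occ)
--         if new == state:
--             break
--         state = new
--     # Write the fixpoint back into the grid and count the occupied seats.
--     grid = [row[:] for row in arr]
--     for (r, c), occ in zip(seats, state):
--         grid[r][c] = "#" if occ else "L"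
--     return sum(row.count("#") for row in grid)
-- ===== Notes on version B (the rewrite author's own statement) =====
-- stated objective: faster
-- what changed: Instead of re-scanning all 8 rays from every cell on every round, B computes the seat list and each seat's visible seat neighbours once (the layout never changes), iterates the automaton on a flat occupancy vector with O(8) work per seat per round, then writes the fixpoint back into the grid and counts; Pre_ excludes ragged grids with a row shorter than the first row, on which A raises IndexError.
import Mathlib
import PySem

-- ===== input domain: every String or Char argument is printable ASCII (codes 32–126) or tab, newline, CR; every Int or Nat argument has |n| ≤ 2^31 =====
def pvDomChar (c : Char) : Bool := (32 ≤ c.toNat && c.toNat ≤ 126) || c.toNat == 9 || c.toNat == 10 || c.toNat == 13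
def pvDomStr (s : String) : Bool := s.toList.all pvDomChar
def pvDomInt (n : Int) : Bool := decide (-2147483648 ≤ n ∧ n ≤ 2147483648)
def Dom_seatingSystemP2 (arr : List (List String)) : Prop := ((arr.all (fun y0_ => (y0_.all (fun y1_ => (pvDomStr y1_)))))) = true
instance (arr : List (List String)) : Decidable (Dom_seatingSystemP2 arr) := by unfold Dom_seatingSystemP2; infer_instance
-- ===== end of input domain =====

-- B precomputes each seat's visible seat neighbours once and then iterates the automaton on a flat
-- occupancy vector, finally writing the fixpoint back into the grid (A re-scans all 8 rays from
-- every cell every round); return values agree — A also mutates its argument in place, B does not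
-- (the equivalence proved here is about the return value only).

-- ===== PORT A =====

def dirsA : List (Int × Int) := [(-1,-1), (-1,0), (-1,1), (0,-1), (0,1), (1,-1), (1,0), (1,1)]

-- history[x][y]; indices are only ever used with 0 ≤ x < R, 0 ≤ y < C, where pyGetD is exact
def getA (g : List (List String)) (x y : Int) : String :=
  PySem.List.pyGetD (PySem.List.pyGetD g x []) y ""

-- the inner `while 0 <= row+x < len(arr) and ... and found == 0` ray walk; the fuel only bounds the
-- walk (R+C+2 strictly exceeds the number of in-bounds cells on any ray), the walk exits on bounds
def rayA (hist : List (List String)) (R C dx dy : Int) : Nat → Int → Int → List Bool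
  | 0, _, _ => []
  | fuel+1, x, y =>
    if 0 ≤ x ∧ x < R ∧ 0 ≤ y ∧ y < C then
      if getA hist x y = "#" then [true]
      else if getA hist x y = "L" then [false]
      else rayA hist R C dx dy fuel (x + dx) (y + dy)
    else []

-- one cell of one round: checkList, sum(checkList), then the two branches (else: arr[row][col] is
-- left as it was, and it equals history[row][col] because history was deep-copied from arr)
def cellA (hist : List (List String)) (R C : Int) (fuel : Nat) (row col : Int) : String :=
  let checkList := dirsA.foldl (fun acc d => acc ++ rayA hist R C d.1 d.2 fuel (row + d.1) (col + d.2)) []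
  let s := checkList.count true
  if getA hist row col = "L" ∧ s = 0 then "#"
  else if getA hist row col = "#" ∧ 5 ≤ s then "L"
  else getA hist row col

-- one round: every write arr[row][col] = … reads only from history, so the in-place double loop is
-- rendered as rebuilding each row; cells at col ≥ len(arr[0]) are never assigned and stay
def stepA (a : List (List String)) : List (List String) :=
  let C := (a.headD []).length
  let fuel := a.length + C + 2
  a.mapIdx (fun r rowOld =>
    (List.range C).map (fun c : Nat => cellA a (a.length : Int) (C : Int) fuel (r : Int) (c : Int))
      ++ rowOld.drop C)

-- `while history != arr:` — the fuel strictly exceeds the number of distinct reachable grids + 2,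
-- so it is never exhausted when the Python loop terminates
def loopA : Nat → List (List String) → List (List String) → List (List String)
  | 0, _, a => a
  | fuel+1, h, a => if h = a then a else loopA fuel a (stepA a)

def seatingSystemP2 (arr : List (List String)) : Int :=
  let final := loopA (2 ^ (arr.length * (arr.headD []).length) + 3) [] arr
  (final.map (fun row => (PySem.List.count row "#" : Int))).sum

-- ===== PORT B =====

def dirsB : List (Int × Int) := [(-1,-1), (-1,0), (-1,1), (0,-1), (0,1), (1,-1), (1,0), (1,1)]

def getB (g : List (List String)) (x y : Int) : String :=
  PySem.List.pyGetD (PySem.List.pyGetD g x []) y ""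

-- arr[r][c] in ("L", "#")
def isSeatB (s : String) : Bool := s == "L" || s == "#"

-- seats = [(r, c) for r in range(R) for c in range(C) if arr[r][c] in ("L", "#")]
def seatsB (arr : List (List String)) : List (Int × Int) :=
  (PySem.List.pyRange 0 (arr.length : Int) 1).flatMap (fun r =>
    (PySem.List.pyRange 0 ((arr.headD []).length : Int) 1).filterMap (fun c =>
      if isSeatB (getB arr r c) then some (r, c) else none))

-- idx = {p: i for i, p in enumerate(seats)}
def idxB (seats : List (Int × Int)) : PySem.Dict (Int × Int) Int :=
  (PySem.List.enumerate seats).foldl (fun d ip => d.insert ip.2 ip.1) PySem.Dict.empty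

-- the `while 0 <= x < R and 0 <= y < C:` walk with `j = idx.get((x, y))`
def rayB (idx : PySem.Dict (Int × Int) Int) (R C dx dy : Int) : Nat → Int → Int → List Int
  | 0, _, _ => []
  | fuel+1, x, y =>
    if 0 ≤ x ∧ x < R ∧ 0 ≤ y ∧ y < C then
      match idx.get? (x, y) with
      | some j => [j]
      | none => rayB idx R C dx dy fuel (x + dx) (y + dy)
    else []

def nbrsB (R C : Int) (fuel : Nat) (idx : PySem.Dict (Int × Int) Int)
    (seats : List (Int × Int)) : List (List Int) :=
  seats.map (fun rc =>
    dirsB.foldl (fun vs d => vs ++ rayB idx R C d.1 d.2 fuel (rc.1 + d.1) (rc.2 + d.2)) [])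

-- one round on the flat state: for occ, vs in zip(state, nbrs): n = sum(state[j] for j in vs); …
def stepB (nbrs : List (List Int)) (state : List Bool) : List Bool :=
  (state.zip nbrs).map (fun ov =>
    let n : Int := (ov.2.map (fun j => if PySem.List.pyGetD state j false then (1 : Int) else 0)).sum
    if !ov.1 && n == 0 then true
    else if ov.1 && 5 ≤ n then false
    else ov.1)

-- `while True: new = …; if new == state: break; state = new` — same fuel bound as port A's loop
def loopB (nbrs : List (List Int)) : Nat → List Bool → List Bool
  | 0, state => state
  | fuel+1, state =>
    let new := stepB nbrs state
    if new = state then state else loopB nbrs fuel new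

-- grid[r][c] = v; r and c only ever come from seats, so 0 ≤ r < R and 0 ≤ c ≤ row length,
-- where toNat and set are exact
def setCellB (g : List (List String)) (p : Int × Int) (v : String) : List (List String) :=
  g.modify p.1.toNat (fun row => row.set p.2.toNat v)

-- for (r, c), occ in zip(seats, state): grid[r][c] = "#" if occ else "L"
-- (grid = [row[:] for row in arr] copies the rows, which is the identity on the value level)
def writeBackB : List ((Int × Int) × Bool) → List (List String) → List (List String)
  | [], g => g
  | pb :: ps, g => writeBackB ps (setCellB g pb.1 (if pb.2 then "#" else "L"))

def seatingSystemP2_alt (arr : List (List String)) : Int :=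
  let R := arr.length
  let C := (arr.headD []).length
  let seats := seatsB arr
  let idx := idxB seats
  let nbrs := nbrsB (R : Int) (C : Int) (R + C + 2) idx seats
  let state := seats.map (fun p => getB arr p.1 p.2 == "#")
  let final := loopB nbrs (2 ^ (R * C) + 3) state
  let grid := writeBackB (seats.zip final) arr
  (grid.map (fun row => (PySem.List.count row "#" : Int))).sum

-- ===== PRECONDITION & SPEC =====
-- Pre_ excludes exactly the ragged grids with a row shorter than the first row, on which the Python A
-- raises IndexError (every cell arr[row][col] with col < len(arr[0]) is read each round).
def Pre_seatingSystemP2 (arr : List (List String)) : Prop :=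
  ∀ row ∈ arr, (arr.headD []).length ≤ row.length
instance (arr : List (List String)) : Decidable (Pre_seatingSystemP2 arr) := by
  unfold Pre_seatingSystemP2; infer_instance

def pvWitness_seatingSystemP2 : List (List String) := [["L", ".", "L"], ["#", "L", "#"]]

def Spec_seatingSystemP2 (arr : List (List String)) (out : Int) : Prop := out = seatingSystemP2_alt arr
instance (arr : List (List String)) (out : Int) : Decidable (Spec_seatingSystemP2 arr out) := by
  unfold Spec_seatingSystemP2; infer_instance

-- ===== CLAIM (what is proved, stated in full; the proofs are below) =====
def Claim_equal_seatingSystemP2 : Prop := ∀ (arr : List (List String)), Dom_seatingSystemP2 arr → Pre_seatingSystemP2 arr → Spec_seatingSystemP2 arr (seatingSystemP2 arr)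

-- ===== LEMMAS AND PROOFS =====

-- cell access with Nat coordinates
def cellOf (g : List (List String)) (r c : Nat) : String := (g.getD r []).getD c ""

-- g has the shape, the out-of-rectangle cells, and the seat pattern of arr (only seat letters differ)
def Conf (arr g : List (List String)) : Prop :=
  g.length = arr.length ∧
  ∀ r : Nat,
    (g.getD r []).length = (arr.getD r []).length ∧
    (g.getD r []).drop (arr.headD []).length = (arr.getD r []).drop (arr.headD []).length ∧
    ∀ c : Nat, c < (arr.headD []).length →
      (if isSeatB (cellOf arr r c) then isSeatB (cellOf g r c) = true
       else cellOf g r c = cellOf arr r c)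

theorem conf_refl (arr : List (List String)) : Conf arr arr := by
  refine ⟨rfl, fun r => ⟨rfl, rfl, fun c _ => ?_⟩⟩
  split <;> simp_all


def flagsOf (arr g : List (List String)) : List Bool :=
  (seatsB arr).map (fun p => getB g p.1 p.2 == "#")

theorem getB_natCast (g : List (List String)) (r c : Nat) :
    getB g (r : Int) (c : Int) = cellOf g r c := by
  simp [getB, cellOf, PySem.List.pyGetD_natCast]

theorem mem_seatsB (arr : List (List String)) (p : Int × Int) :
    p ∈ seatsB arr ↔ 0 ≤ p.1 ∧ p.1 < (arr.length : Int) ∧ 0 ≤ p.2 ∧ p.2 < ((arr.headD []).length : Int)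
      ∧ isSeatB (getB arr p.1 p.2) := by
  obtain ⟨x, y⟩ := p
  simp only [seatsB, List.mem_flatMap, List.mem_filterMap, PySem.List.mem_pyRange_one]
  constructor
  · rintro ⟨r, ⟨hr0, hrR⟩, c, ⟨hc0, hcC⟩, hif⟩
    split at hif
    · cases hif; exact ⟨hr0, hrR, hc0, hcC, by assumption⟩
    · cases hif
  · rintro ⟨hx0, hxR, hy0, hyC, hseat⟩
    exact ⟨x, ⟨hx0, hxR⟩, y, ⟨hy0, hyC⟩, by simp [hseat]⟩

theorem nodup_seatsB (arr : List (List String)) : (seatsB arr).Nodup := by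
  have hfst : ∀ (r : Int) (q : Int × Int),
      q ∈ (PySem.List.pyRange 0 ((arr.headD []).length : Int) 1).filterMap
        (fun c => if isSeatB (getB arr r c) then some (r, c) else none) → q.1 = r := by
    intro r q hq
    rw [List.mem_filterMap] at hq
    obtain ⟨c, _, hif⟩ := hq
    split at hif
    · cases hif; rfl
    · cases hif
  unfold seatsB
  rw [List.nodup_flatMap]
  constructor
  · intro r _
    apply List.Nodup.filterMap _ (PySem.List.nodup_pyRange_one 0 _)
    intro a b p ha hb
    split at ha
    · injection ha with ha'
      split at hb
      · injection hb with hb'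
        injection hb'.trans ha'.symm with h1 h2
        exact h2.symm
      · cases hb
    · cases ha
  · have hnd := (PySem.List.nodup_pyRange_one 0 (arr.length : Int))
    refine List.Pairwise.imp ?_ hnd
    intro r r' hne q hq hq'
    exact hne (by rw [← hfst r q hq, ← hfst r' q hq'])

theorem items_idxB (seats : List (Int × Int)) (h : seats.Nodup) :
    (idxB seats).items = (PySem.List.enumerate seats).map (fun ip => (ip.2, ip.1)) := by
  have h2 : ((PySem.List.enumerate seats).map (fun ip : Int × (Int × Int) => ip.2)).Nodup := by
    rw [PySem.List.map_snd_enumerate]; exact h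
  have h1 : ∀ a ∈ PySem.List.enumerate seats,
      (PySem.Dict.empty : PySem.Dict (Int × Int) Int).contains a.2 = false := by
    intro a _; simp [PySem.Dict.contains_empty]
  have := PySem.Dict.items_foldl_insert_fresh (PySem.List.enumerate seats)
    (fun ip => ip.2) (fun ip => ip.1) PySem.Dict.empty h1 h2
  simpa [idxB, show (PySem.Dict.empty : PySem.Dict (Int × Int) Int).items = [] from rfl] using this

theorem keys_idxB (seats : List (Int × Int)) (h : seats.Nodup) :
    (idxB seats).keys = seats := by
  rw [PySem.Dict.keys, items_idxB seats h, List.map_map]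
  have : ((fun p : (Int × Int) × Int => p.1) ∘ fun ip : Int × (Int × Int) => (ip.2, ip.1))
      = fun ip : Int × (Int × Int) => ip.2 := rfl
  rw [this, PySem.List.map_snd_enumerate]

theorem get?_idxB (seats : List (Int × Int)) (h : seats.Nodup) (p : Int × Int) (j : Int) :
    (idxB seats).get? p = some j ↔ ∃ (k : Nat) (hk : k < seats.length), j = (k : Int) ∧ seats[k] = p := by
  have hkeys : (idxB seats).keys.Nodup := by rw [keys_idxB seats h]; exact h
  rw [PySem.Dict.get?_eq_some_iff_mem_items _ _ _ hkeys, items_idxB seats h]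
  simp only [List.mem_map, PySem.List.mem_enumerate_iff]
  constructor
  · rintro ⟨ip, ⟨k, hk, hip⟩, hswap⟩
    subst hip
    simp only [Prod.mk.injEq] at hswap
    exact ⟨k, hk, by omega, hswap.1⟩
  · rintro ⟨k, hk, hj, hp⟩
    exact ⟨((k : Int), seats[k]), ⟨k, hk, by simp⟩, by simp [hp, hj]⟩

theorem get?_idxB_isSome (seats : List (Int × Int)) (h : seats.Nodup) (p : Int × Int) :
    ((idxB seats).get? p).isSome = true ↔ p ∈ seats := by
  constructor
  · intro hs
    obtain ⟨j, hj⟩ := Option.isSome_iff_exists.mp hs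
    obtain ⟨k, hk, _, hp⟩ := (get?_idxB seats h p j).mp hj
    exact hp ▸ List.getElem_mem hk
  · intro hp
    by_contra hns
    have hnone : (idxB seats).get? p = none := by
      cases hcase : (idxB seats).get? p with
      | none => rfl
      | some j => rw [hcase] at hns; simp at hns
    rw [PySem.Dict.get?_eq_none_iff_not_mem_keys] at hnone
    rw [keys_idxB seats h] at hnone
    exact hnone hp

theorem pyGetD_map_of_get?_idxB (seats : List (Int × Int)) (h : seats.Nodup) (f : Int × Int → Bool)
    (p : Int × Int) (j : Int) (hj : (idxB seats).get? p = some j) :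
    PySem.List.pyGetD (seats.map f) j false = f p := by
  obtain ⟨k, hk, hjk, hp⟩ := (get?_idxB seats h p j).mp hj
  subst hjk
  rw [PySem.List.pyGetD_natCast]
  rw [List.getD_eq_getElem _ _ (by simpa using hk)]
  simp [hp]


theorem getA_eq_getB : getA = getB := rfl

theorem dirsA_eq_dirsB : dirsA = dirsB := rfl

theorem isSeatB_iff (s : String) : isSeatB s = true ↔ s = "L" ∨ s = "#" := by
  simp [isSeatB]

theorem getB_toNat (g : List (List String)) {x y : Int} (hx : 0 ≤ x) (hy : 0 ≤ y) :
    getB g x y = cellOf g x.toNat y.toNat := by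
  simp [getB, cellOf, PySem.List.pyGetD_of_nonneg _ _ hx, PySem.List.pyGetD_of_nonneg _ _ hy]

theorem conf_len {arr g : List (List String)} (h : Conf arr g) : g.length = arr.length := h.1

theorem conf_headD {arr g : List (List String)} (h : Conf arr g) :
    (g.headD []).length = (arr.headD []).length := by
  have h0 := (h.2 0).1
  cases g with
  | nil =>
    have : arr.length = 0 := by simpa using (conf_len h).symm
    rw [List.length_eq_zero_iff] at this
    simp [this]
  | cons a t =>
    cases arr with
    | nil => simp at h0; simpa using h0
    | cons b u => simpa using h0

theorem conf_seat_iff {arr g : List (List String)} (h : Conf arr g) (r c : Nat)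
    (hc : c < (arr.headD []).length) :
    isSeatB (cellOf g r c) = isSeatB (cellOf arr r c) := by
  have := (h.2 r).2.2 c hc
  split at this
  · rename_i hs; rw [this, hs]
  · rename_i hs; rw [this]

theorem conf_nonseat {arr g : List (List String)} (h : Conf arr g) (r c : Nat)
    (hc : c < (arr.headD []).length) (hs : isSeatB (cellOf arr r c) = false) :
    cellOf g r c = cellOf arr r c := by
  have := (h.2 r).2.2 c hc
  rw [hs] at this
  simpa using this

-- the ray walks of A (over the current grid) and of B (over the precomputed seat index) agree
theorem ray_corr (arr g : List (List String)) (hconf : Conf arr g) (dx dy : Int) :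
    ∀ (fuel : Nat) (x y : Int),
      rayA g (arr.length : Int) ((arr.headD []).length : Int) dx dy fuel x y
        = (rayB (idxB (seatsB arr)) (arr.length : Int) ((arr.headD []).length : Int) dx dy fuel x y).map
            (fun j => PySem.List.pyGetD (flagsOf arr g) j false) := by
  intro fuel
  induction fuel with
  | zero => intro x y; simp [rayA, rayB]
  | succ f ih =>
    intro x y
    rw [rayA, rayB]
    by_cases hin : 0 ≤ x ∧ x < (arr.length : Int) ∧ 0 ≤ y ∧ y < ((arr.headD []).length : Int)
    · rw [if_pos hin, if_pos hin]
      obtain ⟨hx0, hxR, hy0, hyC⟩ := hin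
      have hxx : ((x.toNat : Int)) = x := Int.toNat_of_nonneg hx0
      have hyy : ((y.toNat : Int)) = y := Int.toNat_of_nonneg hy0
      have hget : getA g x y = cellOf g x.toNat y.toNat := by
        rw [getA_eq_getB]; exact getB_toNat g hx0 hy0
      have hcb : y.toNat < (arr.headD []).length := by omega
      by_cases hseat : isSeatB (cellOf arr x.toNat y.toNat) = true
      · have hmem : (x, y) ∈ seatsB arr := by
          rw [mem_seatsB]
          refine ⟨hx0, hxR, hy0, hyC, ?_⟩
          rw [getB_toNat arr hx0 hy0]; exact hseat
        have hsome := (get?_idxB_isSome (seatsB arr) (nodup_seatsB arr) (x, y)).mpr hmem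
        obtain ⟨j, hj⟩ := Option.isSome_iff_exists.mp hsome
        rw [hj]
        have hlook : PySem.List.pyGetD (flagsOf arr g) j false = (getB g x y == "#") := by
          unfold flagsOf
          exact pyGetD_map_of_get?_idxB (seatsB arr) (nodup_seatsB arr) _ (x, y) j hj
        have hgseat : isSeatB (cellOf g x.toNat y.toNat) = true := by
          rw [conf_seat_iff hconf _ _ hcb]; exact hseat
        rcases (isSeatB_iff _).mp hgseat with hL | hH
        · rw [hget, hL]
          simp only [List.map_cons, List.map_nil, hlook]
          rw [getB_toNat g hx0 hy0, hL]
          split_ifs <;> simp_all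
        · rw [hget, hH]
          simp only [List.map_cons, List.map_nil, hlook]
          rw [getB_toNat g hx0 hy0, hH]
          split_ifs <;> simp_all
      · have hgns : isSeatB (cellOf g x.toNat y.toNat) = false := by
          rw [conf_seat_iff hconf _ _ hcb]; simpa using hseat
        have hnotmem : (x, y) ∉ seatsB arr := by
          rw [mem_seatsB]
          intro hmem
          apply hseat
          rw [← getB_toNat arr hx0 hy0]
          exact hmem.2.2.2.2
        have hnone : (idxB (seatsB arr)).get? (x, y) = none := by
          cases hc : (idxB (seatsB arr)).get? (x, y) with
          | none => rfl
          | some j =>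
            exfalso; apply hnotmem
            exact (get?_idxB_isSome (seatsB arr) (nodup_seatsB arr) (x, y)).mp (by simp [hc])
        rw [hnone]
        have h1 : ¬ (getA g x y = "#") := by
          rw [hget]; intro hcontra; rw [hcontra] at hgns; simp [isSeatB] at hgns
        have h2 : ¬ (getA g x y = "L") := by
          rw [hget]; intro hcontra; rw [hcontra] at hgns; simp [isSeatB] at hgns
        rw [if_neg h1, if_neg h2]
        exact ih (x + dx) (y + dy)
    · rw [if_neg hin, if_neg hin]; simp

-- a foldl-append loop over mapped ray results is the map of the foldl-append loop
theorem foldl_append_map_corr {α β γ : Type} (F : α → List γ) (G : α → List β) (f : β → γ)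
    (h : ∀ d, F d = (G d).map f) :
    ∀ (l : List α) (acc : List β),
      l.foldl (fun a d => a ++ F d) (acc.map f) = (l.foldl (fun a d => a ++ G d) acc).map f := by
  intro l
  induction l with
  | nil => intro acc; simp
  | cons d t ih =>
    intro acc
    simp only [List.foldl_cons]
    rw [h d, ← List.map_append]
    exact ih (acc ++ G d)

theorem count_true_map {α : Type} (l : List α) (f : α → Bool) :
    (l.map f).count true = l.countP f := by
  rw [List.count_eq_countP, List.countP_map]
  apply List.countP_congr
  intro j _
  simp [Function.comp]


def ruleB (occ : Bool) (n : Int) : Bool :=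
  if !occ && n == 0 then true else if occ && 5 ≤ n then false else occ

def nbrFun (arr : List (List String)) (p : Int × Int) : List Int :=
  dirsB.foldl (fun vs d =>
    vs ++ rayB (idxB (seatsB arr)) (arr.length : Int) ((arr.headD []).length : Int) d.1 d.2
      (arr.length + (arr.headD []).length + 2) (p.1 + d.1) (p.2 + d.2)) []

def cntOf (arr g : List (List String)) (p : Int × Int) : Nat :=
  (nbrFun arr p).countP (fun j => PySem.List.pyGetD (flagsOf arr g) j false)

theorem nbrsB_eq_map (arr : List (List String)) :
    nbrsB (arr.length : Int) ((arr.headD []).length : Int)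
      (arr.length + (arr.headD []).length + 2) (idxB (seatsB arr)) (seatsB arr)
      = (seatsB arr).map (nbrFun arr) := rfl

theorem cellA_corr (arr g : List (List String)) (hconf : Conf arr g) (r c : Nat)
    (hc : c < (arr.headD []).length) :
    cellA g (arr.length : Int) ((arr.headD []).length : Int)
        (arr.length + (arr.headD []).length + 2) (r : Int) (c : Int)
      = if isSeatB (cellOf arr r c) then
          (if ruleB (cellOf g r c == "#") ((cntOf arr g ((r : Int), (c : Int)) : Int)) then "#" else "L")
        else cellOf arr r c := by
  simp only [cellA]
  have hfold := foldl_append_map_corr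
    (fun d : Int × Int => rayA g (arr.length : Int) ((arr.headD []).length : Int) d.1 d.2
      (arr.length + (arr.headD []).length + 2) ((r : Int) + d.1) ((c : Int) + d.2))
    (fun d : Int × Int => rayB (idxB (seatsB arr)) (arr.length : Int) ((arr.headD []).length : Int) d.1 d.2
      (arr.length + (arr.headD []).length + 2) ((r : Int) + d.1) ((c : Int) + d.2))
    (fun j => PySem.List.pyGetD (flagsOf arr g) j false)
    (fun d => ray_corr arr g hconf d.1 d.2 _ _ _) dirsB []
  simp only [List.map_nil] at hfold
  rw [dirsA_eq_dirsB, hfold]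
  rw [count_true_map]
  have hcnt : (List.foldl (fun vs d =>
      vs ++ rayB (idxB (seatsB arr)) (arr.length : Int) ((arr.headD []).length : Int) d.1 d.2
        (arr.length + (arr.headD []).length + 2) ((r : Int) + d.1) ((c : Int) + d.2)) [] dirsB).countP
        (fun j => PySem.List.pyGetD (flagsOf arr g) j false)
      = cntOf arr g ((r : Int), (c : Int)) := rfl
  rw [hcnt]
  rw [getA_eq_getB, getB_natCast]
  set s := cntOf arr g ((r : Int), (c : Int)) with hs
  by_cases hseat : isSeatB (cellOf arr r c) = true
  · rw [if_pos hseat]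
    have hgseat : isSeatB (cellOf g r c) = true := by rw [conf_seat_iff hconf _ _ hc]; exact hseat
    rcases (isSeatB_iff _).mp hgseat with hL | hH
    · rw [hL]
      by_cases hs0 : s = 0
      · rw [if_pos ⟨rfl, hs0⟩]
        simp [ruleB, hs0]
      · rw [if_neg (by intro h; exact hs0 h.2), if_neg (by intro h; exact absurd h.1 (by decide))]
        have : ((s : Int) == 0) = false := by
          simp only [beq_eq_false_iff_ne, ne_eq, Int.natCast_eq_zero]; exact hs0
        simp [ruleB, this]
    · rw [hH]
      rw [if_neg (by intro h; exact absurd h.1 (by decide))]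
      by_cases h5 : 5 ≤ s
      · rw [if_pos ⟨rfl, h5⟩]
        have : (5 : Int) ≤ (s : Int) := by exact_mod_cast h5
        simp [ruleB, this]
      · rw [if_neg (by intro h; exact h5 h.2)]
        have : ¬ (5 : Int) ≤ (s : Int) := by exact_mod_cast h5
        simp [ruleB, this]
  · rw [if_neg hseat]
    have hg := conf_nonseat hconf r c hc (by simpa using hseat)
    rw [hg]
    have hns : isSeatB (cellOf arr r c) = false := by simpa using hseat
    rw [isSeatB] at hns
    simp only [Bool.or_eq_false_iff, beq_eq_false_iff_ne, ne_eq] at hns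
    rw [if_neg (by intro h; exact hns.1 h.1), if_neg (by intro h; exact hns.2 h.1)]

theorem stepA_length (g : List (List String)) : (stepA g).length = g.length := by
  simp [stepA]

theorem stepA_getD_of_lt (g : List (List String)) (r : Nat) (hrg : r < g.length) :
    (stepA g).getD r []
      = (List.range (g.headD []).length).map (fun c : Nat =>
          cellA g (g.length : Int) ((g.headD []).length : Int)
            (g.length + (g.headD []).length + 2) (r : Int) (c : Int))
        ++ (g[r]).drop (g.headD []).length := by
  rw [List.getD_eq_getElem _ _ (by rw [stepA_length]; exact hrg)]
  simp only [stepA]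
  rw [List.getElem_mapIdx]

theorem stepA_cell (arr g : List (List String)) (hconf : Conf arr g) (r c : Nat)
    (hr : r < arr.length) (hc : c < (arr.headD []).length) :
    cellOf (stepA g) r c
      = cellA g (arr.length : Int) ((arr.headD []).length : Int)
          (arr.length + (arr.headD []).length + 2) (r : Int) (c : Int) := by
  have hrg : r < g.length := by rw [conf_len hconf]; exact hr
  have hCg : (g.headD []).length = (arr.headD []).length := conf_headD hconf
  unfold cellOf
  rw [stepA_getD_of_lt g r hrg]
  rw [List.getD_append _ _ _ _ (by simp only [List.length_map, List.length_range]; rw [hCg]; exact hc),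
    List.getD_eq_getElem _ _ (by simp only [List.length_map, List.length_range]; rw [hCg]; exact hc)]
  simp only [List.getElem_map, List.getElem_range]
  rw [hCg, conf_len hconf]

theorem conf_stepA (arr g : List (List String)) (hpre : Pre_seatingSystemP2 arr)
    (hconf : Conf arr g) : Conf arr (stepA g) := by
  have hCg : (g.headD []).length = (arr.headD []).length := conf_headD hconf
  have hlen : (stepA g).length = arr.length := by
    simp only [stepA]; simp [conf_len hconf]
  refine ⟨hlen, fun r => ?_⟩
  by_cases hr : r < arr.length
  · have hrg : r < g.length := by rw [conf_len hconf]; exact hr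
    have hrowget : (stepA g).getD r []
        = (List.range (g.headD []).length).map (fun c : Nat =>
            cellA g (g.length : Int) ((g.headD []).length : Int)
              (g.length + (g.headD []).length + 2) (r : Int) (c : Int))
          ++ (g.getD r []).drop (g.headD []).length := by
      rw [stepA_getD_of_lt g r hrg, List.getD_eq_getElem _ _ hrg]
    have hrowlenC : (arr.headD []).length ≤ (g.getD r []).length := by
      have := (hconf.2 r).1
      rw [this]
      have hmem : arr.getD r [] ∈ arr := by
        rw [List.getD_eq_getElem _ _ hr]; exact List.getElem_mem hr
      exact hpre _ hmem
    refine ⟨?_, ?_, ?_⟩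
    · rw [hrowget]
      rw [List.length_append, List.length_map, List.length_range, List.length_drop]
      rw [hCg, (hconf.2 r).1]
      have h1 := (hconf.2 r).1
      omega
    · rw [hrowget]
      have hlenmap : ((List.range (g.headD []).length).map (fun c : Nat =>
          cellA g (g.length : Int) ((g.headD []).length : Int)
            (g.length + (g.headD []).length + 2) (r : Int) (c : Int))).length
          = (arr.headD []).length := by rw [List.length_map, List.length_range]; exact hCg
      rw [List.drop_left' hlenmap, hCg]
      exact (hconf.2 r).2.1
    · intro c hc
      have hcell := stepA_cell arr g hconf r c hr hc
      rw [cellA_corr arr g hconf r c hc] at hcell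
      by_cases hseat : isSeatB (cellOf arr r c) = true
      · rw [if_pos hseat]
        rw [hcell, if_pos hseat]
        split <;> simp [isSeatB]
      · rw [if_neg hseat]
        rw [hcell, if_neg hseat]
  · have hrga : arr.getD r [] = [] := List.getD_eq_default _ _ (by omega)
    have hrgg : (stepA g).getD r [] = [] := List.getD_eq_default _ _ (by
      unfold stepA; simp [conf_len hconf]; omega)
    refine ⟨by rw [hrga, hrgg], by rw [hrga, hrgg], fun c hc => ?_⟩
    have h1 : cellOf arr r c = "" := by unfold cellOf; rw [hrga]; simp
    have h2 : cellOf (stepA g) r c = "" := by unfold cellOf; rw [hrgg]; simp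
    rw [h1, h2]
    simp [isSeatB]


theorem flags_stepA (arr g : List (List String)) (hconf : Conf arr g) :
    flagsOf arr (stepA g) = stepB ((seatsB arr).map (nbrFun arr)) (flagsOf arr g) := by
  unfold stepB
  rw [show flagsOf arr g = (seatsB arr).map (fun p => getB g p.1 p.2 == "#") from rfl]
  rw [List.zip_map']
  rw [List.map_map]
  unfold flagsOf
  rw [List.map_eq_map_iff]
  intro p hp
  rw [mem_seatsB] at hp
  obtain ⟨hx0, hxR, hy0, hyC, hseatp⟩ := hp
  set r := p.1.toNat with hrdef
  set c := p.2.toNat with hcdef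
  have hp1 : ((r : Int), (c : Int)) = p := by
    obtain ⟨a, b⟩ := p
    simp only [Prod.mk.injEq]
    constructor <;> [exact Int.toNat_of_nonneg hx0; exact Int.toNat_of_nonneg hy0]
  have hr : r < arr.length := by omega
  have hc : c < (arr.headD []).length := by omega
  have hseat : isSeatB (cellOf arr r c) = true := by
    rw [← getB_natCast]
    rw [show ((r : Int)) = p.1 from (congrArg Prod.fst hp1), show ((c : Int)) = p.2 from (congrArg Prod.snd hp1)]
    exact hseatp
  have h1 : getB (stepA g) p.1 p.2 = cellOf (stepA g) r c := getB_toNat _ hx0 hy0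
  rw [h1, stepA_cell arr g hconf r c hr hc, cellA_corr arr g hconf r c hc, if_pos hseat]
  have h2 : getB g p.1 p.2 = cellOf g r c := getB_toNat _ hx0 hy0
  simp only [Function.comp]
  have hsum : ((nbrFun arr p).map
      (fun j => if PySem.List.pyGetD ((seatsB arr).map (fun p => getB g p.1 p.2 == "#")) j false
        then (1 : Int) else 0)).sum = ((cntOf arr g p : Nat) : Int) := by
    rw [PySem.List.sum_map_ite_one_zero]
    rfl
  rw [hp1] at *
  rw [hsum, h2]
  have hbody : (if !(cellOf g r c == "#") && (((cntOf arr g p : Nat) : Int) == 0) then true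
      else if (cellOf g r c == "#") && 5 ≤ ((cntOf arr g p : Nat) : Int) then false
      else (cellOf g r c == "#")) = ruleB (cellOf g r c == "#") ((cntOf arr g p : Nat) : Int) := rfl
  rw [hbody]
  cases hcase : ruleB (cellOf g r c == "#") ((cntOf arr g p : Nat) : Int) <;> simp

theorem conf_eq_iff (arr g h : List (List String)) (hpre : Pre_seatingSystemP2 arr)
    (hg : Conf arr g) (hh : Conf arr h) :
    g = h ↔ flagsOf arr g = flagsOf arr h := by
  constructor
  · intro he; rw [he]
  · intro hf
    have hflag : ∀ p ∈ seatsB arr, (getB g p.1 p.2 == "#") = (getB h p.1 p.2 == "#") :=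
      List.map_eq_map_iff.mp hf
    apply List.ext_getElem (by rw [conf_len hg, conf_len hh])
    intro r h1 h2
    have hr : r < arr.length := by rw [← conf_len hg]; exact h1
    have hrowg : g[r] = g.getD r [] := (List.getD_eq_getElem _ _ h1).symm
    have hrowh : h[r] = h.getD r [] := (List.getD_eq_getElem _ _ h2).symm
    rw [hrowg, hrowh]
    have hlg : (g.getD r []).length = (arr.getD r []).length := (hg.2 r).1
    have hlh : (h.getD r []).length = (arr.getD r []).length := (hh.2 r).1
    have hCle : (arr.headD []).length ≤ (arr.getD r []).length := by
      have hmem : arr.getD r [] ∈ arr := by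
        rw [List.getD_eq_getElem _ _ hr]; exact List.getElem_mem hr
      exact hpre _ hmem
    apply List.ext_getElem (by rw [hlg, hlh])
    intro c hc1 hc2
    by_cases hcC : c < (arr.headD []).length
    · by_cases hseat : isSeatB (cellOf arr r c) = true
      · have hp : ((r : Int), (c : Int)) ∈ seatsB arr := by
          rw [mem_seatsB]
          refine ⟨by omega, by omega, by omega, by omega, ?_⟩
          rw [getB_natCast]; exact hseat
        have := hflag _ hp
        rw [getB_natCast, getB_natCast] at this
        have hcg : (g.getD r []).getD c "" = (g.getD r [])[c] := List.getD_eq_getElem _ _ hc1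
        have hch : (h.getD r []).getD c "" = (h.getD r [])[c] := List.getD_eq_getElem _ _ hc2
        have hsg : isSeatB (cellOf g r c) = true := by rw [conf_seat_iff hg _ _ hcC]; exact hseat
        have hsh : isSeatB (cellOf h r c) = true := by rw [conf_seat_iff hh _ _ hcC]; exact hseat
        unfold cellOf at this hsg hsh
        rw [hcg] at this hsg
        rw [hch] at this hsh
        rcases (isSeatB_iff _).mp hsg with e1 | e1 <;> rcases (isSeatB_iff _).mp hsh with e2 | e2 <;>
          rw [e1, e2] <;> rw [e1, e2] at this <;> first | rfl | (exfalso; simp at this)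
      · have e1 := conf_nonseat hg r c hcC (by simpa using hseat)
        have e2 := conf_nonseat hh r c hcC (by simpa using hseat)
        unfold cellOf at e1 e2
        rw [List.getD_eq_getElem _ _ hc1] at e1
        rw [List.getD_eq_getElem _ _ hc2] at e2
        rw [e1, e2]
    · have d1 := (hg.2 r).2.1
      have d2 := (hh.2 r).2.1
      have hca : c < (arr.getD r []).length := by omega
      have hsplit : ∀ (row : List String), c < row.length →
          row.drop (arr.headD []).length = (arr.getD r []).drop (arr.headD []).length →
          ∀ (hcr : c < row.length), row[c] = (arr.getD r []).getD c "" := by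
        intro row _ hdrop hcr
        have h3 : c - (arr.headD []).length < (row.drop (arr.headD []).length).length := by
          rw [List.length_drop]; omega
        have e1 : row[c] = (row.drop (arr.headD []).length).getD (c - (arr.headD []).length) "" := by
          rw [List.getD_eq_getElem _ _ h3, List.getElem_drop]
          congr 1; omega
        rw [e1, hdrop]
        have h4 : c - (arr.headD []).length < ((arr.getD r []).drop (arr.headD []).length).length := by
          rw [List.length_drop]; omega
        rw [List.getD_eq_getElem _ _ h4, List.getElem_drop, List.getD_eq_getElem _ _ hca]
        congr 1; omega
      rw [hsplit _ hc1 d1 hc1, hsplit _ hc2 d2 hc2]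


theorem loop_corr (arr : List (List String)) (hpre : Pre_seatingSystemP2 arr) :
    ∀ (m : Nat) (g : List (List String)), Conf arr g →
      Conf arr (loopA m g (stepA g)) ∧
      flagsOf arr (loopA m g (stepA g))
        = loopB ((seatsB arr).map (nbrFun arr)) (m + 1) (flagsOf arr g) := by
  intro m
  induction m with
  | zero =>
    intro g hconf
    refine ⟨conf_stepA arr g hpre hconf, ?_⟩
    show flagsOf arr (stepA g) = loopB _ 1 (flagsOf arr g)
    rw [loopB]
    have hnew := flags_stepA arr g hconf
    split
    · rename_i heq
      rw [hnew, heq]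
    · rw [loopB, hnew]
  | succ m ih =>
    intro g hconf
    have hnew := flags_stepA arr g hconf
    have hconfs := conf_stepA arr g hpre hconf
    rw [loopA, loopB]
    by_cases he : g = stepA g
    · rw [if_pos he]
      have hfe : flagsOf arr (stepA g) = flagsOf arr g := by rw [← he]
      rw [if_pos (by rw [hnew] at hfe; exact hfe)]
      exact ⟨hconfs, by rw [hfe]⟩
    · rw [if_neg he]
      have hne : ¬ (stepB ((seatsB arr).map (nbrFun arr)) (flagsOf arr g) = flagsOf arr g) := by
        intro hcontra
        apply he
        apply ((conf_eq_iff arr g (stepA g) hpre hconf hconfs).mpr ?_)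
        rw [hnew]
        exact hcontra.symm
      rw [if_neg hne]
      obtain ⟨ihc, ihe⟩ := ih (stepA g) hconfs
      exact ⟨ihc, by rw [ihe, hnew]⟩

theorem sum_map_natCast {α : Type} (l : List α) (f : α → Nat) :
    (l.map (fun a => ((f a : Nat) : Int))).sum = (((l.map f).sum : Nat) : Int) := by
  induction l with
  | nil => simp
  | cons a t ih => simp only [List.map_cons, List.sum_cons, ih]; push_cast; ring

theorem sum_map_add_nat {α : Type} (l : List α) (v w : α → Nat) :
    (l.map (fun a => v a + w a)).sum = (l.map v).sum + (l.map w).sum := by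
  induction l with
  | nil => simp
  | cons a t ih => simp only [List.map_cons, List.sum_cons, ih]; omega

theorem filterMap_if_some {α β : Type} (P : α → Bool) (g : α → β) (l : List α) :
    l.filterMap (fun a => if P a then some (g a) else none) = (l.filter P).map g := by
  induction l with
  | nil => simp
  | cons a t ih =>
    by_cases h : P a = true
    · simp [h, ih]
    · simp only [Bool.not_eq_true] at h
      simp [h, ih]

theorem map_eq_range_getD (l : List (List String)) (f : List String → Nat) :
    l.map f = (List.range l.length).map (fun r => f (l.getD r [])) := by
  apply List.ext_getElem (by simp)
  intro i h1 h2
  simp only [List.getElem_map, List.getElem_range]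
  rw [List.getD_eq_getElem _ _ (by simpa using h1)]

theorem take_eq_range_getD (l : List String) (n : Nat) (h : n ≤ l.length) :
    l.take n = (List.range n).map (fun i => l.getD i "") := by
  apply List.ext_getElem (by simpa)
  intro i h1 h2
  simp only [List.getElem_take, List.getElem_map, List.getElem_range]
  rw [List.getD_eq_getElem _ _ (by simp at h1; omega)]

theorem count_row_corr (arr g : List (List String)) (hpre : Pre_seatingSystemP2 arr)
    (hconf : Conf arr g) (r : Nat) (hr : r < arr.length) :
    List.count "#" (g.getD r [])
      = List.countP (fun p => getB g p.1 p.2 == "#")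
          ((PySem.List.pyRange 0 ((arr.headD []).length : Int) 1).filterMap
            (fun c => if isSeatB (getB arr (r : Int) c) then some ((r : Int), c) else none))
        + List.count "#" ((arr.getD r []).drop (arr.headD []).length) := by
  have hCle : (arr.headD []).length ≤ (arr.getD r []).length := by
    have hmem : arr.getD r [] ∈ arr := by
      rw [List.getD_eq_getElem _ _ hr]; exact List.getElem_mem hr
    exact hpre _ hmem
  have hCleg : (arr.headD []).length ≤ (g.getD r []).length := by rw [(hconf.2 r).1]; exact hCle
  rw [← List.take_append_drop (arr.headD []).length (g.getD r []), List.count_append]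
  rw [(hconf.2 r).2.1]
  congr 1
  rw [filterMap_if_some, List.countP_map, List.countP_filter]
  rw [PySem.List.pyRange_zero_natCast, List.countP_map]
  rw [take_eq_range_getD _ _ hCleg]
  rw [List.count_eq_countP, List.countP_map]
  apply List.countP_congr
  intro c hc
  rw [List.mem_range] at hc
  simp only [Function.comp]
  rw [getB_natCast, getB_natCast]
  show ((cellOf g r c == "#") = true) ↔ (((cellOf g r c == "#") && isSeatB (cellOf arr r c)) = true)
  have hgoal : ((cellOf g r c) == "#") = ((cellOf g r c == "#") && isSeatB (cellOf arr r c)) := by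
    by_cases hseat : isSeatB (cellOf arr r c) = true
    · rw [hseat, Bool.and_true]
    · have hcc := conf_nonseat hconf r c hc (by simpa using hseat)
      rw [hcc]
      have : (cellOf arr r c == "#") = false := by
        rcases hb : cellOf arr r c == "#" with _ | _
        · rfl
        · exfalso
          rw [isSeatB, (by simpa using hb : cellOf arr r c = "#")] at hseat
          simp at hseat
      rw [this]
      simp
  exact iff_of_eq (congrArg (fun b => b = true) hgoal)

theorem count_corr (arr g : List (List String)) (hpre : Pre_seatingSystemP2 arr)
    (hconf : Conf arr g) :
    (g.map (fun row => ((PySem.List.count row "#" : Nat) : Int))).sum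
      = (((flagsOf arr g).count true : Nat) : Int)
        + (arr.map (fun row => ((PySem.List.count (row.drop (arr.headD []).length) "#" : Nat) : Int))).sum := by
  rw [sum_map_natCast, sum_map_natCast]
  have hflat : (flagsOf arr g).count true
      = ((List.range arr.length).map (fun r : Nat =>
          List.countP (fun p => getB g p.1 p.2 == "#")
            ((PySem.List.pyRange 0 ((arr.headD []).length : Int) 1).filterMap
              (fun c => if isSeatB (getB arr (r : Int) c) then some ((r : Int), c) else none)))).sum := by
    rw [show flagsOf arr g = (seatsB arr).map (fun p => getB g p.1 p.2 == "#") from rfl]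
    rw [count_true_map]
    unfold seatsB
    rw [List.countP_flatMap]
    rw [PySem.List.pyRange_zero_natCast arr.length, List.map_map]
    rfl
  have hA : (g.map (fun row => PySem.List.count row "#")).sum
      = ((List.range arr.length).map (fun r => List.count "#" (g.getD r []))).sum := by
    rw [map_eq_range_getD g (fun row => PySem.List.count row "#"), conf_len hconf]
    rfl
  have hExtra : (arr.map (fun row => PySem.List.count (row.drop (arr.headD []).length) "#")).sum
      = ((List.range arr.length).map (fun r =>
          List.count "#" ((arr.getD r []).drop (arr.headD []).length))).sum := by
    rw [map_eq_range_getD arr (fun row => PySem.List.count (row.drop (arr.headD []).length) "#")]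
    rfl
  have hnat : (g.map (fun row => PySem.List.count row "#")).sum
      = (flagsOf arr g).count true
        + (arr.map (fun row => PySem.List.count (row.drop (arr.headD []).length) "#")).sum := by
    rw [hA, hExtra, hflat, ← sum_map_add_nat]
    congr 1
    apply List.map_congr_left
    intro r hrm
    rw [List.mem_range] at hrm
    exact count_row_corr arr g hpre hconf r hrm
  rw [hnat]
  push_cast
  ring

-- ===== the write-back grid of port B is a configuration with flags equal to the final state =====

theorem setCellB_length (g : List (List String)) (p : Int × Int) (v : String) :
    (setCellB g p v).length = g.length := by
  simp [setCellB, List.length_modify]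

theorem getD_setCellB (g : List (List String)) (p : Int × Int) (v : String) (r : Nat) :
    (setCellB g p v).getD r []
      = if p.1.toNat = r then (g.getD r []).set p.2.toNat v else g.getD r [] := by
  rw [List.getD_eq_getElem?_getD, List.getD_eq_getElem?_getD, setCellB, List.getElem?_modify]
  by_cases h : p.1.toNat = r
  · cases g[r]? with
    | none => simp [h]
    | some row => simp [h]
  · cases g[r]? with
    | none => simp [h]
    | some row => simp [h]

theorem writeBackB_length (ps : List ((Int × Int) × Bool)) (g : List (List String)) :
    (writeBackB ps g).length = g.length := by
  induction ps generalizing g with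
  | nil => rfl
  | cons pb t ih => rw [writeBackB, ih, setCellB_length]

theorem writeBackB_rowlen (ps : List ((Int × Int) × Bool)) (g : List (List String)) (r : Nat) :
    ((writeBackB ps g).getD r []).length = (g.getD r []).length := by
  induction ps generalizing g with
  | nil => rfl
  | cons pb t ih =>
    rw [writeBackB, ih, getD_setCellB]
    split <;> simp

theorem writeBackB_drop (ps : List ((Int × Int) × Bool)) (g : List (List String)) (C : Nat)
    (hC : ∀ pb ∈ ps, pb.1.2.toNat < C) (r : Nat) :
    ((writeBackB ps g).getD r []).drop C = ((g.getD r []).drop C) := by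
  induction ps generalizing g with
  | nil => rfl
  | cons pb t ih =>
    rw [writeBackB, ih _ (fun q hq => hC q (List.mem_cons_of_mem _ hq)), getD_setCellB]
    split
    · apply List.ext_getElem (by simp)
      intro i h1 h2
      rw [List.getElem_drop, List.getElem_drop, List.getElem_set_ne]
      have := hC pb (List.mem_cons_self)
      omega
    · rfl

theorem cellOf_writeBackB_notmem (ps : List ((Int × Int) × Bool)) (g : List (List String))
    (r c : Nat) (h : ∀ pb ∈ ps, ¬ (pb.1.1.toNat = r ∧ pb.1.2.toNat = c)) :
    cellOf (writeBackB ps g) r c = cellOf g r c := by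
  induction ps generalizing g with
  | nil => rfl
  | cons pb t ih =>
    rw [writeBackB, ih _ (fun q hq => h q (List.mem_cons_of_mem _ hq))]
    unfold cellOf
    rw [getD_setCellB]
    split
    · rename_i hr
      have hc : pb.1.2.toNat ≠ c := fun hcc => h pb List.mem_cons_self ⟨hr, hcc⟩
      rw [List.getD_eq_getElem?_getD, List.getD_eq_getElem?_getD, List.getElem?_set, if_neg hc]
      exact List.getD_eq_getElem?_getD.symm
    · rfl

theorem cellOf_writeBackB_mem (ps : List ((Int × Int) × Bool)) (g : List (List String))
    (p : Int × Int) (b : Bool) (hmem : (p, b) ∈ ps)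
    (hnd : (ps.map (fun pb => (pb.1.1.toNat, pb.1.2.toNat))).Nodup)
    (hb1 : p.1.toNat < g.length) (hb2 : p.2.toNat < (g.getD p.1.toNat []).length) :
    cellOf (writeBackB ps g) p.1.toNat p.2.toNat = if b then "#" else "L" := by
  induction ps generalizing g with
  | nil => cases hmem
  | cons qd t ih =>
    rw [writeBackB]
    rw [List.map_cons, List.nodup_cons] at hnd
    have hb2' : p.2.toNat < (g[p.1.toNat]?.getD []).length := by
      rw [← List.getD_eq_getElem?_getD]; exact hb2
    by_cases hcoord : qd.1.1.toNat = p.1.toNat ∧ qd.1.2.toNat = p.2.toNat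
    · have hnotail : ∀ pb ∈ t, ¬ (pb.1.1.toNat = p.1.toNat ∧ pb.1.2.toNat = p.2.toNat) := by
        intro pb hpb hcc
        exact hnd.1 (List.mem_map.mpr ⟨pb, hpb, by
          rw [hcc.1, hcc.2, hcoord.1, hcoord.2]⟩)
      have hhead : qd = (p, b) := by
        rcases List.mem_cons.mp hmem with hh | hh
        · exact hh.symm
        · exact absurd ⟨rfl, rfl⟩ (hnotail (p, b) hh)
      subst hhead
      rw [cellOf_writeBackB_notmem t _ p.1.toNat p.2.toNat hnotail]
      unfold cellOf
      rw [getD_setCellB]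
      simp [List.getD_eq_getElem?_getD, hb2']
    · have htail : (p, b) ∈ t := by
        rcases List.mem_cons.mp hmem with hh | hh
        · exact absurd ⟨by rw [← hh], by rw [← hh]⟩ hcoord
        · exact hh
      apply ih _ htail hnd.2
      · rw [setCellB_length]; exact hb1
      · rw [getD_setCellB]
        split <;> simp [hb2']

theorem seats_coords_inj (arr : List (List String)) :
    ((seatsB arr).map (fun p : Int × Int => (p.1.toNat, p.2.toNat))).Nodup := by
  rw [List.nodup_map_iff_inj_on (nodup_seatsB arr)]
  intro p hp q hq he
  obtain ⟨hp1, _, hp2, _, _⟩ := (mem_seatsB arr p).mp hp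
  obtain ⟨hq1, _, hq2, _, _⟩ := (mem_seatsB arr q).mp hq
  injection he with e1 e2
  obtain ⟨a, b⟩ := p; obtain ⟨x, y⟩ := q
  simp only at *
  simp only [Prod.mk.injEq]
  exact ⟨by omega, by omega⟩

theorem coordnd_zip (arr : List (List String)) (F : List Bool)
    (hF : F.length = (seatsB arr).length) :
    (((seatsB arr).zip F).map (fun pb => (pb.1.1.toNat, pb.1.2.toNat))).Nodup := by
  have he : ((seatsB arr).zip F).map (fun pb => (pb.1.1.toNat, pb.1.2.toNat))
      = (seatsB arr).map (fun p : Int × Int => (p.1.toNat, p.2.toNat)) := by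
    apply List.ext_getElem (by simp [List.length_zip]; omega)
    intro i h1 h2
    simp [List.getElem_zip]
  rw [he]
  exact seats_coords_inj arr

theorem conf_writeBackB (arr : List (List String)) (hpre : Pre_seatingSystemP2 arr)
    (F : List Bool) (hF : F.length = (seatsB arr).length) :
    Conf arr (writeBackB ((seatsB arr).zip F) arr) := by
  have hcoordC : ∀ pb ∈ (seatsB arr).zip F, pb.1.2.toNat < (arr.headD []).length := by
    intro pb hpb
    have hmem : pb.1 ∈ seatsB arr := by
      have := List.of_mem_zip hpb
      exact this.1
    obtain ⟨_, _, _, h4, _⟩ := (mem_seatsB arr pb.1).mp hmem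
    omega
  refine ⟨writeBackB_length _ _, fun r => ⟨writeBackB_rowlen _ _ _, writeBackB_drop _ _ _ hcoordC r, ?_⟩⟩
  intro c hc
  by_cases hseat : isSeatB (cellOf arr r c) = true
  · rw [if_pos hseat]
    by_cases hr : r < arr.length
    · have hpmem : ((r : Int), (c : Int)) ∈ seatsB arr := by
        rw [mem_seatsB]
        refine ⟨by omega, by omega, by omega, by omega, ?_⟩
        rw [getB_natCast]; exact hseat
      obtain ⟨k, hk, hkeq⟩ := List.getElem_of_mem hpmem
      have hkF : k < F.length := by omega
      have hkz : k < ((seatsB arr).zip F).length := by simp [List.length_zip]; omega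
      have hzmem : (((r : Int), (c : Int)), F[k]) ∈ (seatsB arr).zip F := by
        have hzk : ((seatsB arr).zip F)[k] = ((seatsB arr)[k], F[k]) := List.getElem_zip
        rw [hkeq] at hzk
        rw [← hzk]
        exact List.getElem_mem hkz
      have hcoordnd := coordnd_zip arr F hF
      have hrow : (arr.headD []).length ≤ (arr.getD r []).length := by
        have hmem : arr.getD r [] ∈ arr := by
          rw [List.getD_eq_getElem _ _ hr]; exact List.getElem_mem hr
        exact hpre _ hmem
      have := cellOf_writeBackB_mem ((seatsB arr).zip F) arr ((r : Int), (c : Int)) F[k]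
        hzmem hcoordnd (by simpa using hr) (by simp only [Int.toNat_natCast]; omega)
      simp only [Int.toNat_natCast] at this
      rw [this]
      split <;> simp [isSeatB]
    · exfalso
      have hrow0 : arr.getD r [] = [] := List.getD_eq_default _ _ (by omega)
      have hcell : cellOf arr r c = "" := by unfold cellOf; rw [hrow0]; rfl
      rw [hcell] at hseat
      simp [isSeatB] at hseat
  · rw [if_neg hseat]
    apply cellOf_writeBackB_notmem
    intro pb hpb hcoord
    have hmem : pb.1 ∈ seatsB arr := (List.of_mem_zip hpb).1
    obtain ⟨h1, _, h2, _, h5⟩ := (mem_seatsB arr pb.1).mp hmem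
    apply hseat
    rw [getB_toNat arr h1 h2, hcoord.1, hcoord.2] at h5
    exact h5

theorem flags_writeBackB (arr : List (List String)) (hpre : Pre_seatingSystemP2 arr)
    (F : List Bool) (hF : F.length = (seatsB arr).length) :
    flagsOf arr (writeBackB ((seatsB arr).zip F) arr) = F := by
  have hcoordnd := coordnd_zip arr F hF
  apply List.ext_getElem (by simp [flagsOf]; omega)
  intro k h1 h2
  have hk : k < (seatsB arr).length := by simpa [flagsOf] using h1
  simp only [flagsOf, List.getElem_map]
  obtain ⟨hp1, hpR, hp2, hpC, _⟩ := (mem_seatsB arr (seatsB arr)[k]).mp (List.getElem_mem hk)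
  rw [getB_toNat _ hp1 hp2]
  have hkF : k < F.length := by omega
  have hkz : k < ((seatsB arr).zip F).length := by simp [List.length_zip]; omega
  have hzmem : ((seatsB arr)[k], F[k]) ∈ (seatsB arr).zip F := by
    have hzk : ((seatsB arr).zip F)[k] = ((seatsB arr)[k], F[k]) := List.getElem_zip
    rw [← hzk]
    exact List.getElem_mem hkz
  have hrow : (arr.headD []).length ≤ (arr.getD (seatsB arr)[k].1.toNat []).length := by
    by_cases hrr : (seatsB arr)[k].1.toNat < arr.length
    · have hmem : arr.getD (seatsB arr)[k].1.toNat [] ∈ arr := by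
        rw [List.getD_eq_getElem _ _ hrr]; exact List.getElem_mem hrr
      exact hpre _ hmem
    · omega
  have := cellOf_writeBackB_mem ((seatsB arr).zip F) arr (seatsB arr)[k] F[k]
    hzmem hcoordnd (by omega) (by omega)
  rw [this]
  cases hFk : F[k] <;> simp

theorem stepB_length (nbrs : List (List Int)) (s : List Bool) (h : s.length = nbrs.length) :
    (stepB nbrs s).length = s.length := by
  simp [stepB, List.length_zip, h]

theorem loopB_length (nbrs : List (List Int)) (n : Nat) (s : List Bool)
    (h : s.length = nbrs.length) : (loopB nbrs n s).length = nbrs.length := by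
  induction n generalizing s with
  | zero => simpa [loopB] using h
  | succ n ih =>
    rw [loopB]
    split
    · simpa using h
    · exact ih _ (by rw [stepB_length _ _ h]; exact h)

-- ===== VERDICT (by name: the statement is the Claim_ definition above) =====
theorem seatingSystemP2_spec : Claim_equal_seatingSystemP2 := by
  intro arr hdom hpre
  unfold Spec_seatingSystemP2
  cases arr with
  | nil => rfl
  | cons a t =>
    simp only [seatingSystemP2, seatingSystemP2_alt]
    have hsucc : 2 ^ ((a :: t).length * ((a :: t).headD []).length) + 3
        = (2 ^ ((a :: t).length * ((a :: t).headD []).length) + 2) + 1 := rfl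
    rw [hsucc, loopA, if_neg (by simp)]
    obtain ⟨hconfF, hflagF⟩ :=
      loop_corr (a :: t) hpre (2 ^ ((a :: t).length * ((a :: t).headD []).length) + 2)
        (a :: t) (conf_refl (a :: t))
    set F := loopB ((seatsB (a :: t)).map (nbrFun (a :: t)))
      (2 ^ ((a :: t).length * ((a :: t).headD []).length) + 3)
      (flagsOf (a :: t) (a :: t)) with hFdef
    have hFlen : F.length = (seatsB (a :: t)).length := by
      rw [hFdef]
      rw [loopB_length]
      · simp
      · simp [flagsOf]
    have hBflag : flagsOf (a :: t) (writeBackB ((seatsB (a :: t)).zip F) (a :: t)) = F :=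
      flags_writeBackB (a :: t) hpre F hFlen
    have hBconf : Conf (a :: t) (writeBackB ((seatsB (a :: t)).zip F) (a :: t)) :=
      conf_writeBackB (a :: t) hpre F hFlen
    rw [count_corr (a :: t) _ hpre hconfF, hflagF]
    have hgoalB : (seatsB (a :: t)).map (fun p => getB (a :: t) p.1 p.2 == "#")
        = flagsOf (a :: t) (a :: t) := rfl
    rw [nbrsB_eq_map, hgoalB]
    rw [count_corr (a :: t) _ hpre hBconf, hBflag]
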